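-- pv_equiv track=rewrite | github.com/rsnikhil/Experimental_RISCV_Feature_Model | src/Constraint_Check.py | are_hartids
-- ===== SOURCE A (Python) =====
-- def are_hartids (xs):
--     if xs == []: return False
--     if xs [0] != 0: return False
--     last_x = xs [0]
--     for x in xs [1:]:
--         if last_x >= x : return False
--         last_x = x
--     return True
-- ===== SOURCE B (Python) =====
-- def are_hartids(xs):
--     # simpler: valid iff non-empty, starts at 0, and equals its own sorted-deduplicated view
--     return bool(xs) and xs[0] == 0 and xs == sorted(set(xs))
-- ===== Notes on version B (the rewrite author's own statement) =====
-- stated objective: simpler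
-- what changed: Replaces A's explicit adjacent-comparison loop with a one-line check that xs is non-empty, starts at 0, and equals sorted(set(xs)) (true exactly when xs is strictly increasing).
import Mathlib
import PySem

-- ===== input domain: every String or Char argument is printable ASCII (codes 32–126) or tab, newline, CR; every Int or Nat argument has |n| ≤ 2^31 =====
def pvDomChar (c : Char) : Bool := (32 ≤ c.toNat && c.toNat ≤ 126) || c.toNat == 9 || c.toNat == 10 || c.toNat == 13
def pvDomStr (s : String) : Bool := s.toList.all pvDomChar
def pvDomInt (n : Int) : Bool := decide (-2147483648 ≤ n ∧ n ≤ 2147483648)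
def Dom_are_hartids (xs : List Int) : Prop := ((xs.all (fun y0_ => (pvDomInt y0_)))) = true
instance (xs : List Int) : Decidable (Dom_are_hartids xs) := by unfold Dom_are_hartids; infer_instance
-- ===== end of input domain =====

-- B replaces A's adjacent-comparison loop with "xs non-empty, starts at 0, and equals sorted(set(xs))"; objective: simpler.

-- ===== PORT A =====
def are_hartids_loop (last_x : Int) : List Int → Bool
  | [] => true
  | x :: rest => if last_x ≥ x then false else are_hartids_loop x rest

def are_hartids (xs : List Int) : Bool :=
  match xs with
  | [] => false
  | x0 :: rest => if x0 ≠ 0 then false else are_hartids_loop x0 rest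

-- ===== PORT B =====
def are_hartids_alt (xs : List Int) : Bool :=
  !xs.isEmpty && PySem.List.pyGetD xs 0 0 == 0
    && decide (xs = PySem.List.sorted (PySem.Set.ofList xs) (fun x => x) false)

-- ===== PRECONDITION & SPEC =====
def Spec_are_hartids (xs : List Int) (out : Bool) : Prop := out = are_hartids_alt xs
instance (xs : List Int) (out : Bool) : Decidable (Spec_are_hartids xs out) := by unfold Spec_are_hartids; infer_instance

-- ===== CLAIM (what is proved, stated in full; the proofs are below) =====
def Claim_equal_are_hartids : Prop := ∀ (xs : List Int), Dom_are_hartids xs → Spec_are_hartids xs (are_hartids xs)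

-- ===== LEMMAS AND PROOFS =====

lemma are_hartids_loop_iff (l : List Int) (a : Int) :
    are_hartids_loop a l = true ↔ (a :: l).Pairwise (· < ·) := by
  induction l generalizing a with
  | nil => simp [are_hartids_loop]
  | cons x r ih =>
      by_cases h : a ≥ x
      · simp only [are_hartids_loop, if_pos h, List.pairwise_cons]
        constructor
        · intro hf; cases hf
        · rintro ⟨hall, -⟩
          exact absurd (hall x (by simp)) (not_lt.mpr h)
      · have hax : a < x := lt_of_not_ge h
        simp only [are_hartids_loop, if_neg h, ih x]
        constructor
        · intro hp
          refine List.pairwise_cons.mpr ⟨?_, hp⟩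
          intro b hb
          rcases List.mem_cons.mp hb with rfl | hbr
          · exact hax
          · exact lt_trans hax ((List.pairwise_cons.mp hp).1 b hbr)
        · exact fun hp => (List.pairwise_cons.mp hp).2

lemma foldl_add_of_nodup_disjoint (xs : List Int) :
    ∀ acc : List Int, xs.Nodup → (∀ x ∈ xs, x ∉ acc) →
      xs.foldl PySem.Set.add acc = acc ++ xs := by
  induction xs with
  | nil => intro acc _ _; simp
  | cons x r ih =>
      intro acc hnd hdisj
      have hx : PySem.Set.add acc x = acc ++ [x] := by
        simp [PySem.Set.add, hdisj x (by simp)]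
      rw [List.foldl_cons, hx,
        ih (acc ++ [x]) (List.nodup_cons.mp hnd).2
          (fun y hy => by
            simp only [List.mem_append, List.mem_singleton]
            rintro (hya | rfl)
            · exact hdisj y (List.mem_cons_of_mem _ hy) hya
            · exact (List.nodup_cons.mp hnd).1 hy)]
      simp

lemma ofList_eq_self_of_nodup (xs : List Int) (h : xs.Nodup) :
    PySem.Set.ofList xs = xs := by
  simpa [PySem.Set.ofList, PySem.Set.empty] using
    foldl_add_of_nodup_disjoint xs [] h (by simp)

lemma sorted_set_eq_iff (xs : List Int) :
    xs = PySem.List.sorted (PySem.Set.ofList xs) (fun x => x) false ↔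
      xs.Pairwise (· < ·) := by
  constructor
  · intro h
    rw [h]
    exact PySem.List.sorted_ofList_pairwise_lt xs
  · intro h
    have hnd : xs.Nodup := h.imp (fun hab => ne_of_lt hab)
    rw [ofList_eq_self_of_nodup xs hnd]
    exact (PySem.List.sorted_eq_self_of_pairwise xs (fun x => x) (h.imp le_of_lt)).symm

-- ===== VERDICT (by name: the statement is the Claim_ definition above) =====
theorem are_hartids_spec : Claim_equal_are_hartids := by
  intro xs _
  unfold Spec_are_hartids
  cases xs with
  | nil => rfl
  | cons x0 rest =>
      have hloop : are_hartids_loop x0 rest = decide ((x0 :: rest).Pairwise (· < ·)) := by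
        by_cases hp : (x0 :: rest).Pairwise (· < ·)
        · simp [hp, (are_hartids_loop_iff rest x0).mpr hp]
        · simp only [hp, decide_false]
          exact Bool.eq_false_iff.mpr (fun ht => hp ((are_hartids_loop_iff rest x0).mp ht))
      simp only [are_hartids, are_hartids_alt,
        List.isEmpty_cons, Bool.not_false, Bool.true_and,
        PySem.List.pyGetD_zero_cons, hloop]
      rw [show (decide ((x0 :: rest) = PySem.List.sorted (PySem.Set.ofList (x0 :: rest)) (fun x => x) false))
            = decide ((x0 :: rest).Pairwise (· < ·)) from by
        simp [sorted_set_eq_iff]]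
      by_cases hx : x0 = 0
      · simp [hx]
      · simp [hx]
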